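-- pv_equiv track=rewrite | github.com/ysjeon-bstrs/scm_dashboard | scm_dashboard_v6/ui/charts/utils.py | sku_color_map
-- ===== SOURCE A (Python) =====
-- from typing import Dict, Sequence, Iterable, List, Any
--
-- _PALETTE = [
--     "#4E79A7","#F28E2B","#E15759","#76B7B2","#59A14F",
--     "#EDC948","#B07AA1","#FF9DA7","#9C755F","#BAB0AC",
--     "#1F77B4","#FF7F0E","#2CA02C","#D62728","#9467BD",
--     "#8C564B","#E377C2","#7F7F7F","#BCBD22","#17BECF",
-- ]
--
-- def sku_color_map(skus: Sequence[str]) -> Dict[str, str]: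
--     """SKU별 고정 색상 매핑을 반환한다.
--
--     - v6 단계에서 차트별 팔레트 정책을 재정의할 수 있도록 단순화된 구현을 제공한다.
--     - 현재는 v5 톤과 동일한 팔레트를 순환 적용한다.
--     """
--
--     mapping: Dict[str, str] = {}
--     i = 0
--     for sku in skus:
--         if sku not in mapping:
--             mapping[sku] = _PALETTE[i % len(_PALETTE)]
--             i += 1
--     return mapping
-- ===== SOURCE B (Python) =====
-- from typing import Dict, Sequence
--
-- _PALETTE = [
--     "#4E79A7","#F28E2B","#E15759","#76B7B2","#59A14F",
--     "#EDC948","#B07AA1","#FF9DA7","#9C755F","#BAB0AC",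
--     "#1F77B4","#FF7F0E","#2CA02C","#D62728","#9467BD",
--     "#8C564B","#E377C2","#7F7F7F","#BCBD22","#17BECF",
-- ]
--
-- def sku_color_map(skus: Sequence[str]) -> Dict[str, str]:
--     skus = list(skus)
--     # unordered distinct SKUs, put back into first-occurrence order by sorting
--     # on the position of each SKU's first occurrence (injective key: no ties)
--     order = sorted(set(skus), key=skus.index)
--     return {s: _PALETTE[k % len(_PALETTE)] for k, s in enumerate(order)}
-- ===== Notes on version B (the rewrite author's own statement) =====
-- stated objective: alternative
-- what changed: Instead of A's single sequential pass maintaining an ordered dict and a manual counter, B takes the unordered set of SKUs, reconstructs first-occurrence order by sorting on skus.index (an injective key, so the order is deterministic), and then assigns cycling palette colors by enumerate over the sorted list.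
import Mathlib
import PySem

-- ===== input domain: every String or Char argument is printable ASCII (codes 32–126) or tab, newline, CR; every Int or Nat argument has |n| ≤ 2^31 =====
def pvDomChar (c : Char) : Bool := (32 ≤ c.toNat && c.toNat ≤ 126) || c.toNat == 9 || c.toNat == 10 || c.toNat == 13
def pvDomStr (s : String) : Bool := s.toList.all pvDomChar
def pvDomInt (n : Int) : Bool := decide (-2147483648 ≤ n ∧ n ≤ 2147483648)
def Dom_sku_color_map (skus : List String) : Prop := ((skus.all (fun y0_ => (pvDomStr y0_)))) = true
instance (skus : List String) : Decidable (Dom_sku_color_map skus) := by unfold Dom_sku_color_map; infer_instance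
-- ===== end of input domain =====

-- B replaces A's sequential pass (ordered dict + manual counter) by a sort-based
-- reconstruction: take set(skus), sort it by skus.index (injective key), then
-- assign cycling palette colors by enumerate (objective: alternative).

-- ===== PORT A =====
-- module constant _PALETTE (shared by both modules)
def pvPalette : List String :=
  ["#4E79A7","#F28E2B","#E15759","#76B7B2","#59A14F",
   "#EDC948","#B07AA1","#FF9DA7","#9C755F","#BAB0AC",
   "#1F77B4","#FF7F0E","#2CA02C","#D62728","#9467BD",
   "#8C564B","#E377C2","#7F7F7F","#BCBD22","#17BECF"]

-- A: mapping = {}; i = 0; for sku in skus: if sku not in mapping: mapping[sku] = _PALETTE[i % 20]; i += 1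
-- (_PALETTE[i % len(_PALETTE)]: the index i % 20 is always in range, so pyGetD with "" is exact)
def sku_color_map (skus : List String) : List (String × String) :=
  (skus.foldl
    (fun (st : PySem.Dict String String × Int) sku =>
      if st.1.contains sku then st
      else (st.1.insert sku
              (PySem.List.pyGetD pvPalette (PySem.Int.mod st.2 (pvPalette.length : Int)) ""),
            st.2 + 1))
    (PySem.Dict.empty, 0)).1.items

-- ===== PORT B =====
-- B: order = sorted(set(skus), key=skus.index); {s: _PALETTE[k % 20] for k, s in enumerate(order)}
-- (skus.index(s) always succeeds since s ∈ set(skus) ⊆ skus, so `.getD 0` is exact;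
--  the key is injective on the set, so sorting the unordered set is deterministic)
def sku_color_map_alt (skus : List String) : List (String × String) :=
  let order := PySem.List.sorted (PySem.Set.ofList skus)
      (fun s => (PySem.List.index? skus s).getD 0) false
  (PySem.List.enumerate order).map
    (fun p => (p.2, PySem.List.pyGetD pvPalette (PySem.Int.mod p.1 (pvPalette.length : Int)) ""))

-- ===== PRECONDITION & SPEC =====
def Spec_sku_color_map (skus : List String) (out : List (String × String)) : Prop := out = sku_color_map_alt skus
instance (skus : List String) (out : List (String × String)) : Decidable (Spec_sku_color_map skus out) := by unfold Spec_sku_color_map; infer_instance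

-- ===== CLAIM (what is proved, stated in full; the proofs are below) =====
def Claim_equal_sku_color_map : Prop := ∀ (skus : List String), Dom_sku_color_map skus → Spec_sku_color_map skus (sku_color_map skus)

-- ===== LEMMAS AND PROOFS =====

-- the color assigned to the n-th fresh SKU
def pvColor (n : Int) : String :=
  PySem.List.pyGetD pvPalette (PySem.Int.mod n (pvPalette.length : Int)) ""

-- the common reference computation: the pairs still to be produced, given the SKUs
-- already seen (in order) and the next color index
def pvGo (seen : List String) (n : Int) (skus : List String) : List (String × String) :=
  match skus with
  | [] => []
  | s :: rest =>
    if s ∈ seen then pvGo seen n rest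
    else (s, pvColor n) :: pvGo (seen ++ [s]) (n + 1) rest

-- A's loop, from any dict with Nodup keys and counter = number of keys
theorem pvA_loop (skus : List String) (d : PySem.Dict String String)
    (hnd : d.keys.Nodup) :
    (skus.foldl
      (fun (st : PySem.Dict String String × Int) sku =>
        if st.1.contains sku then st
        else (st.1.insert sku (pvColor st.2), st.2 + 1))
      (d, (d.keys.length : Int))).1.items
    = d.items ++ pvGo d.keys (d.keys.length : Int) skus := by
  induction skus generalizing d with
  | nil => simp [pvGo]
  | cons s rest ih =>
    by_cases hc : d.contains s = true
    · have hm : s ∈ d.keys := (PySem.Dict.contains_iff_mem_keys d s).mp hc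
      simp only [List.foldl_cons, hc, if_true, pvGo, if_pos hm]
      exact ih d hnd
    · have hc' : d.contains s = false := by simpa using hc
      have hm : s ∉ d.keys := fun h => hc ((PySem.Dict.contains_iff_mem_keys d s).mpr h)
      simp only [List.foldl_cons, hc', Bool.false_eq_true, if_false, pvGo, if_neg hm]
      have hkeys : (d.insert s (pvColor (d.keys.length : Int))).keys = d.keys ++ [s] :=
        PySem.Dict.keys_insert_of_not_contains d _ hc'
      have hnd' : (d.insert s (pvColor (d.keys.length : Int))).keys.Nodup := by
        rw [hkeys]; simp only [List.nodup_append, List.nodup_singleton, hnd, true_and]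
        exact fun a ha b hb h => hm ((h.trans (List.mem_singleton.mp hb)) ▸ ha)
      have := ih (d.insert s (pvColor (d.keys.length : Int))) hnd'
      rw [hkeys] at this
      have hlen : ((d.keys ++ [s]).length : Int) = (d.keys.length : Int) + 1 := by
        simp
      rw [hlen] at this
      rw [this, PySem.Dict.items_insert_of_not_contains d _ hc', List.append_assoc]
      rfl

-- the enumerate-map pass over the dedup order, from any already-seen prefix
theorem pvB_loop (skus : List String) (seen : List String) :
    (PySem.List.enumerate (skus.foldl PySem.Set.add seen)).map
      (fun p => (p.2, pvColor p.1))
    = (PySem.List.enumerate seen).map (fun p => (p.2, pvColor p.1))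
      ++ pvGo seen (seen.length : Int) skus := by
  induction skus generalizing seen with
  | nil => simp [pvGo]
  | cons s rest ih =>
    by_cases hm : s ∈ seen
    · have hadd : PySem.Set.add seen s = seen := by
        simp [PySem.Set.add, hm]
      simp only [List.foldl_cons, hadd, pvGo, if_pos hm]
      exact ih seen
    · have hadd : PySem.Set.add seen s = seen ++ [s] := by
        simp [PySem.Set.add, hm]
      simp only [List.foldl_cons, hadd, pvGo, if_neg hm]
      rw [ih (seen ++ [s]), PySem.List.enumerate_append]
      have hlen : ((seen ++ [s]).length : Int) = (seen.length : Int) + 1 := by simp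
      rw [hlen]
      simp [PySem.List.enumerate]

-- folding Set.add from any start set s = s followed by the fresh part of the dedup
theorem pvFoldl_add_filter (xs : List String) (s : List String) :
    xs.foldl PySem.Set.add s
      = s ++ (xs.foldl PySem.Set.add []).filter (fun y => decide (y ∉ s)) := by
  induction xs generalizing s with
  | nil => simp
  | cons x xs ih =>
    have hx0 : PySem.Set.add ([] : List String) x = [x] := by simp [PySem.Set.add]
    rw [List.foldl_cons, List.foldl_cons, hx0, ih [x]]
    by_cases hx : x ∈ s
    · have hadd : PySem.Set.add s x = s := by simp [PySem.Set.add, hx]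
      rw [hadd, ih s]
      congr 1
      rw [List.filter_append, List.filter_filter]
      have h1 : List.filter (fun y => decide (y ∉ s)) [x] = [] := by simp [hx]
      rw [h1, List.nil_append]
      apply List.filter_congr
      intro y _
      by_cases hyx : y = x <;> by_cases hys : y ∈ s <;> simp [hyx, hys, hx]
    · have hadd : PySem.Set.add s x = s ++ [x] := by simp [PySem.Set.add, hx]
      rw [hadd, ih (s ++ [x]), List.append_assoc]
      congr 1
      rw [List.filter_append, List.filter_filter]
      have h1 : List.filter (fun y => decide (y ∉ s)) [x] = [x] := by simp [hx]
      rw [h1]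
      congr 1
      apply List.filter_congr
      intro y _
      by_cases hyx : y = x <;> by_cases hys : y ∈ s <;> simp [hyx, hys, hx]

-- dedup (x :: xs) = x :: (fresh part of dedup xs)
theorem pvDedup_cons (x : String) (xs : List String) :
    PySem.List.dedup (x :: xs)
      = x :: (PySem.List.dedup xs).filter (fun y => decide (y ∉ ([x] : List String))) := by
  have h0 : PySem.List.dedup (x :: xs) = (x :: xs).foldl PySem.Set.add [] := by
    rw [PySem.List.dedup_eq_ofList, PySem.Set.ofList_eq_foldl]
  have h1 : PySem.List.dedup xs = xs.foldl PySem.Set.add [] := by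
    rw [PySem.List.dedup_eq_ofList, PySem.Set.ofList_eq_foldl]
  rw [h0, h1]
  have hx0 : PySem.Set.add ([] : List String) x = [x] := by simp [PySem.Set.add]
  simp only [List.foldl_cons, hx0]
  rw [pvFoldl_add_filter xs [x]]
  rfl

-- the dedup order is strictly increasing in the first-occurrence index
theorem pvDedup_pairwise (xs : List String) :
    (PySem.List.dedup xs).Pairwise
      (fun a b => (PySem.List.index? xs a).getD 0 < (PySem.List.index? xs b).getD 0) := by
  induction xs with
  | nil =>
    rw [show PySem.List.dedup ([] : List String) = [] from rfl]
    exact List.Pairwise.nil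
  | cons x xs ih =>
    rw [pvDedup_cons]
    constructor
    · intro b hb
      have hbd := List.mem_of_mem_filter hb
      have hbne : b ≠ x := by
        have := List.of_mem_filter hb
        simpa using this
      have hbx : b ∈ xs := (PySem.List.mem_dedup _ _).mp hbd
      obtain ⟨k, hk⟩ := Option.isSome_iff_exists.mp
        ((PySem.List.index?_isSome_iff xs b).mpr hbx)
      rw [PySem.List.index?_cons_self, PySem.List.index?_cons_of_ne xs (Ne.symm hbne), hk]
      simp
    · have hfil := List.Pairwise.filter
        (fun y => decide (y ∉ ([x] : List String))) ih
      refine List.Pairwise.imp_of_mem ?_ hfil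
      intro a b ha hb hab
      have hane : a ≠ x := by have := List.of_mem_filter ha; simpa using this
      have hbne : b ≠ x := by have := List.of_mem_filter hb; simpa using this
      have hax : a ∈ xs := (PySem.List.mem_dedup _ _).mp (List.mem_of_mem_filter ha)
      have hbx : b ∈ xs := (PySem.List.mem_dedup _ _).mp (List.mem_of_mem_filter hb)
      obtain ⟨ka, hka⟩ := Option.isSome_iff_exists.mp
        ((PySem.List.index?_isSome_iff xs a).mpr hax)
      obtain ⟨kb, hkb⟩ := Option.isSome_iff_exists.mp
        ((PySem.List.index?_isSome_iff xs b).mpr hbx)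
      rw [PySem.List.index?_cons_of_ne xs (Ne.symm hane),
          PySem.List.index?_cons_of_ne xs (Ne.symm hbne), hka, hkb]
      rw [hka, hkb] at hab
      simpa using Nat.succ_lt_succ (by simpa using hab)

-- sorting set(skus) by first-occurrence index reconstructs the dedup order
theorem pvSorted_eq_dedup (skus : List String) :
    PySem.List.sorted (PySem.Set.ofList skus)
      (fun s => (PySem.List.index? skus s).getD 0) false
    = PySem.List.dedup skus := by
  apply PySem.List.sorted_eq_of_perm_of_pairwise_lt
  · rw [PySem.List.dedup_eq_ofList]
  · exact pvDedup_pairwise skus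

-- ===== VERDICT (by name: the statement is the Claim_ definition above) =====
theorem sku_color_map_spec : Claim_equal_sku_color_map := by
  intro skus _
  show sku_color_map skus = sku_color_map_alt skus
  have hA := pvA_loop skus PySem.Dict.empty (by simp)
  have hB := pvB_loop skus []
  simp only [PySem.Dict.keys_empty, List.length_nil, Nat.cast_zero] at hA
  simp only [List.length_nil, Nat.cast_zero, PySem.List.enumerate, List.map_nil,
    List.nil_append] at hB
  unfold sku_color_map sku_color_map_alt
  rw [show (fun (st : PySem.Dict String String × Int) sku =>
        if st.1.contains sku then st
        else (st.1.insert sku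
                (PySem.List.pyGetD pvPalette (PySem.Int.mod st.2 (pvPalette.length : Int)) ""),
              st.2 + 1))
      = (fun (st : PySem.Dict String String × Int) sku =>
        if st.1.contains sku then st
        else (st.1.insert sku (pvColor st.2), st.2 + 1)) from rfl]
  rw [hA]
  rw [show (fun (p : Int × String) =>
        (p.2, PySem.List.pyGetD pvPalette (PySem.Int.mod p.1 (pvPalette.length : Int)) ""))
      = (fun (p : Int × String) => (p.2, pvColor p.1)) from rfl]
  rw [pvSorted_eq_dedup]
  rw [show PySem.List.dedup skus = skus.foldl PySem.Set.add [] from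
    by rw [PySem.List.dedup_eq_ofList, PySem.Set.ofList_eq_foldl]]
  rw [hB]
  simp [PySem.Dict.empty]
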